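-- pv_equiv track=rewrite | github.com/fatalhalt/PythonPractice | difference_between_2dates.py | NumDaysBetween
-- ===== SOURCE A (Python) =====
-- def NumDaysBetween(y1,m1,d1,y2,m2,d2):
--     days = 0
--     for y in range(y1, y1 + (y2-y1)):
--         if (y < y2): # if not on current year then fast-forward to y2 and set m1 to January
--             for m in range(m1, 12):
--                 days += NumDaysInMonth(y, m)
--             m1 = 1
--             m2 += 1
--     for m in range (m1, m2):
--         days += NumDaysInMonth(y2, m)
--     days = days + (d2 - d1)
--     return days
--
-- def NumDaysInMonth(y, m):
--     return 30
-- ===== SOURCE B (Python) =====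
-- def NumDaysBetween(y1,m1,d1,y2,m2,d2):
--     # Closed-form O(1): sum the month lengths (30 each) of each empty-able range directly.
--     n = y2 - y1
--     if n <= 0:
--         months = max(0, m2 - m1)
--     else:
--         months = max(0, 12 - m1) + 11*(n-1) + max(0, m2 + n - 1)
--     return 30*months + (d2 - d1)
-- ===== Notes on version B (the rewrite author's own statement) =====
-- stated objective: faster
-- what changed: Replaced the per-year and per-month accumulation loops by a closed-form arithmetic expression (30*months between the dates, with max-0 terms that are exactly the empty-range sums), agreeing with A on every input.
import Mathlib
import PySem

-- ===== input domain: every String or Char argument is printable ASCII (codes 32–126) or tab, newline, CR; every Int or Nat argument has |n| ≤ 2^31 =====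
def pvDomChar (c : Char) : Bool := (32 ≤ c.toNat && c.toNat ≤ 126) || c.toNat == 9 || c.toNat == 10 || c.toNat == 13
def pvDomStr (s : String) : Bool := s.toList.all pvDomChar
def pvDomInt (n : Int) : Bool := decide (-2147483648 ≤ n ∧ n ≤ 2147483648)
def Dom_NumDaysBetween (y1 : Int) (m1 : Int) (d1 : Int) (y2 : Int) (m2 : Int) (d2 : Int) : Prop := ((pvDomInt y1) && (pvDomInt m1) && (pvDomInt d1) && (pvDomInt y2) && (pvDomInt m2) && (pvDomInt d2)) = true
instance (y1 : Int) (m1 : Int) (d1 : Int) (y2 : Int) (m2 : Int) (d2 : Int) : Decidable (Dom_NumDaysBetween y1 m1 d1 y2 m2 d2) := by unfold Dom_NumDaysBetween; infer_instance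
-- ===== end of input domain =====

-- B replaces A's per-year/per-month accumulation loops by O(1) closed-form arithmetic (objective: faster).

-- ===== PORT A =====
def NumDaysInMonth (y : Int) (m : Int) : Int := 30

-- the body of A's outer 'for y in …' loop, on state (days, m1, m2)
def pvStepA (y2 : Int) (st : Int × Int × Int) (y : Int) : Int × Int × Int :=
  if y < y2 then
    ((PySem.List.pyRange st.2.1 12 1).foldl (fun d m => d + NumDaysInMonth y m) st.1, 1, st.2.2 + 1)
  else st

def NumDaysBetween (y1 : Int) (m1 : Int) (d1 : Int) (y2 : Int) (m2 : Int) (d2 : Int) : Int :=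
  let st := (PySem.List.pyRange y1 (y1 + (y2 - y1)) 1).foldl (pvStepA y2) (0, m1, m2)
  let days := (PySem.List.pyRange st.2.1 st.2.2 1).foldl (fun d m => d + NumDaysInMonth y2 m) st.1
  days + (d2 - d1)

-- ===== PORT B =====
def NumDaysBetween_alt (y1 : Int) (m1 : Int) (d1 : Int) (y2 : Int) (m2 : Int) (d2 : Int) : Int :=
  let n := y2 - y1
  let months := if n ≤ 0 then max 0 (m2 - m1)
                else max 0 (12 - m1) + 11 * (n - 1) + max 0 (m2 + n - 1)
  30 * months + (d2 - d1)

-- ===== PRECONDITION & SPEC =====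
def Spec_NumDaysBetween (y1 : Int) (m1 : Int) (d1 : Int) (y2 : Int) (m2 : Int) (d2 : Int) (out : Int) : Prop := out = NumDaysBetween_alt y1 m1 d1 y2 m2 d2
instance (y1 : Int) (m1 : Int) (d1 : Int) (y2 : Int) (m2 : Int) (d2 : Int) (out : Int) : Decidable (Spec_NumDaysBetween y1 m1 d1 y2 m2 d2 out) := by unfold Spec_NumDaysBetween; infer_instance

-- ===== CLAIM (what is proved, stated in full; the proofs are below) =====
def Claim_equal_NumDaysBetween : Prop := ∀ (y1 : Int) (m1 : Int) (d1 : Int) (y2 : Int) (m2 : Int) (d2 : Int), Dom_NumDaysBetween y1 m1 d1 y2 m2 d2 → Spec_NumDaysBetween y1 m1 d1 y2 m2 d2 (NumDaysBetween y1 m1 d1 y2 m2 d2)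

-- ===== LEMMAS AND PROOFS =====

-- the inner month loop adds 30 per element
lemma pvInnerFold (y : Int) (l : List Int) (d : Int) :
    l.foldl (fun d m => d + NumDaysInMonth y m) d = d + 30 * l.length := by
  induction l generalizing d with
  | nil => simp
  | cons x xs ih => rw [List.foldl_cons, ih]; simp [NumDaysInMonth]; ring

-- the inner month loop over range(a, b) adds 30 * max 0 (b - a)
lemma pvInnerRange (y a b d : Int) :
    (PySem.List.pyRange a b 1).foldl (fun d m => d + NumDaysInMonth y m) d
      = d + 30 * max 0 (b - a) := by
  rw [pvInnerFold, PySem.List.length_pyRange_one]; omega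

-- steady state of the outer loop: once m1 = 1, each of k further years (all < y2) adds 330 and bumps m2
lemma pvSteady (y2 : Int) (k : Nat) : ∀ (a d m2 : Int), a + k ≤ y2 →
    (PySem.List.pyRange a (a + k) 1).foldl (pvStepA y2) (d, 1, m2)
      = (d + 330 * k, 1, m2 + k) := by
  induction k with
  | zero => intro a d m2 _; simp [PySem.List.pyRange_one_eq_nil]
  | succ k ih =>
    intro a d m2 h
    have ha : a < a + (k + 1 : Nat) := by push_cast; omega
    rw [PySem.List.pyRange_one_cons ha]
    have hst : pvStepA y2 (d, 1, m2) a = (d + 330, 1, m2 + 1) := by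
      have hy : a < y2 := by push_cast at h; omega
      simp [pvStepA, hy, pvInnerRange]
    have hb : a + (k + 1 : Nat) = (a + 1) + (k : Nat) := by push_cast; ring
    rw [List.foldl_cons, hst, hb, ih (a + 1) (d + 330) (m2 + 1) (by push_cast at h ⊢; omega)]
    simp only [Prod.mk.injEq]
    refine ⟨by push_cast; ring, by simp, by push_cast; ring⟩

-- ===== VERDICT (by name: the statement is the Claim_ definition above) =====
theorem NumDaysBetween_spec : Claim_equal_NumDaysBetween := by
  intro y1 m1 d1 y2 m2 d2 _
  show NumDaysBetween y1 m1 d1 y2 m2 d2 = NumDaysBetween_alt y1 m1 d1 y2 m2 d2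
  unfold NumDaysBetween NumDaysBetween_alt
  by_cases hn : y2 - y1 ≤ 0
  · have he : y1 + (y2 - y1) ≤ y1 := by omega
    rw [PySem.List.pyRange_one_eq_nil he]
    simp only [List.foldl_nil, pvInnerRange]
    simp [hn]
  · -- at least one full year: peel the first iteration, then the steady state
    rw [not_le] at hn
    have h1 : (1:Int) ≤ y2 - y1 := by omega
    have hcons : y1 < y1 + (y2 - y1) := by omega
    rw [PySem.List.pyRange_one_cons hcons]
    have hst : pvStepA y2 (0, m1, m2) y1 = (30 * max 0 (12 - m1), 1, m2 + 1) := by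
      have hy : y1 < y2 := by omega
      simp [pvStepA, hy, pvInnerRange]
    rw [List.foldl_cons, hst]
    have hk : y1 + (y2 - y1) = (y1 + 1) + ((y2 - y1 - 1).toNat : Int) := by omega
    rw [hk, pvSteady y2 (y2 - y1 - 1).toNat (y1 + 1) _ _ (by omega)]
    simp only [pvInnerRange]
    have h2 : ((y2 - y1 - 1).toNat : Int) = y2 - y1 - 1 := by omega
    rw [h2]
    have hn' : ¬ (y2 - y1 ≤ 0) := by omega
    simp only [hn', if_false]
    have e1 : max 0 (m2 + 1 + (y2 - y1 - 1) - 1) = max 0 (m2 + (y2 - y1) - 1) := by omega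
    rw [e1]; ring
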